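-- pv_equiv track=rewrite | github.com/perekatypole/tasks_py | lessons1-4/6.48.py | max_odd_digit
-- ===== SOURCE A (Python) =====
-- def max_odd_digit(n):
--     max_odd = -1
--     while n > 0:
--         digit = n % 10
--         if digit % 2 == 1 and digit > max_odd:
--             max_odd = digit
--         n //= 10
--     return max_odd
-- ===== SOURCE B (Python) =====
-- def _has_digit(n, d):
--     while n > 0:
--         if n % 10 == d:
--             return True
--         n //= 10
--     return False
--
--
-- def max_odd_digit(n):
--     for d in (9, 7, 5, 3, 1):
--         if _has_digit(n, d):
--             return d
--     return -1
-- ===== Notes on version B (the rewrite author's own statement) =====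
-- stated objective: alternative
-- what changed: Instead of scanning the digits once with a running maximum, B probes the five odd candidates 9,7,5,3,1 in descending order and returns the first that occurs as a digit of n (membership test per candidate), falling back to -1.
import Mathlib
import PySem

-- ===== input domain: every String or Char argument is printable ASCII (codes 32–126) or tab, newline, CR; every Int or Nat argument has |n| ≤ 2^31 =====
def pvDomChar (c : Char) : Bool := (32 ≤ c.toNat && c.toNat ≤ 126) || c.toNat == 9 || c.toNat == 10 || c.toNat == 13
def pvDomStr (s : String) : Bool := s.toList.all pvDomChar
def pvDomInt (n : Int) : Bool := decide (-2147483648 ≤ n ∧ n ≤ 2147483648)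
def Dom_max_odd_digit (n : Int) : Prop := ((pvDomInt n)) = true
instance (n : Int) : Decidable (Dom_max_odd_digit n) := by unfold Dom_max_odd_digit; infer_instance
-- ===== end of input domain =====

-- B replaces A's running-maximum digit scan by probing the odd candidates 9,7,5,3,1
-- in descending order and returning the first that occurs as a digit of n (alternative algorithm, same cost class).


-- ===== PORT A =====
-- literal port of A's while loop: running maximum over the digits n % 10, n //= 10
-- (the Python local 'digit = n % 10' is written inline)
def max_odd_digit_loop (n maxOdd : Int) : Int :=
  if 0 < n then
    max_odd_digit_loop (PySem.Int.floordiv n 10)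
      (if PySem.Int.mod (PySem.Int.mod n 10) 2 = 1 ∧ PySem.Int.mod n 10 > maxOdd
       then PySem.Int.mod n 10 else maxOdd)
  else maxOdd
termination_by n.toNat
decreasing_by
  rw [PySem.Int.floordiv_eq_ediv_of_pos (by omega : (0:Int) < 10)]
  omega

def max_odd_digit (n : Int) : Int := max_odd_digit_loop n (-1)

-- ===== PORT B =====
-- literal port of B's _has_digit while loop
def hasDigit (n d : Int) : Bool :=
  if 0 < n then
    if PySem.Int.mod n 10 = d then true
    else hasDigit (PySem.Int.floordiv n 10) d
  else false
termination_by n.toNat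
decreasing_by
  rw [PySem.Int.floordiv_eq_ediv_of_pos (by omega : (0:Int) < 10)]
  omega

-- B's for-loop over the tuple (9,7,5,3,1) with early return: first candidate that is a digit, else -1
def max_odd_digit_alt (n : Int) : Int :=
  (([9, 7, 5, 3, 1] : List Int).find? (fun d => hasDigit n d)).getD (-1)

-- ===== PRECONDITION & SPEC =====
def Spec_max_odd_digit (n : Int) (out : Int) : Prop := out = max_odd_digit_alt n
instance (n : Int) (out : Int) : Decidable (Spec_max_odd_digit n out) := by unfold Spec_max_odd_digit; infer_instance

-- ===== CLAIM (what is proved, stated in full; the proofs are below) =====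
def Claim_equal_max_odd_digit : Prop := ∀ (n : Int), Dom_max_odd_digit n → Spec_max_odd_digit n (max_odd_digit n)

-- ===== LEMMAS AND PROOFS =====

-- the accumulator never decreases
theorem loop_ge (n maxOdd : Int) : maxOdd ≤ max_odd_digit_loop n maxOdd := by
  induction n, maxOdd using max_odd_digit_loop.induct with
  | case1 n maxOdd h ih =>
    rw [max_odd_digit_loop, if_pos h]
    refine le_trans ?_ ih
    split_ifs with hc
    · exact le_of_lt hc.2
    · exact le_refl _
  | case2 n maxOdd h => rw [max_odd_digit_loop, if_neg h]

-- any odd digit of n is ≤ the loop's result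
theorem loop_ub (d : Int) (hodd : PySem.Int.mod d 2 = 1) (n maxOdd : Int)
    (hd : hasDigit n d = true) : d ≤ max_odd_digit_loop n maxOdd := by
  induction n, maxOdd using max_odd_digit_loop.induct with
  | case1 n maxOdd h ih =>
    rw [hasDigit, if_pos h] at hd
    rw [max_odd_digit_loop, if_pos h]
    simp only [dite_eq_ite] at ih
    by_cases he : PySem.Int.mod n 10 = d
    · by_cases hc : d > maxOdd
      · rw [he, if_pos (⟨hodd, hc⟩ : _ ∧ _)]
        exact loop_ge _ _
      · refine le_trans (by omega : d ≤ maxOdd) (le_trans ?_ (loop_ge _ _))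
        split_ifs with hc2
        · exact le_of_lt hc2.2
        · exact le_refl _
    · rw [if_neg he] at hd
      exact ih hd
  | case2 n maxOdd h =>
    rw [hasDigit, if_neg h] at hd
    exact absurd hd (by simp)

-- the loop's result is the accumulator itself or an odd digit of n
theorem loop_cases (n maxOdd : Int) :
    max_odd_digit_loop n maxOdd = maxOdd ∨
    (PySem.Int.mod (max_odd_digit_loop n maxOdd) 2 = 1 ∧
     hasDigit n (max_odd_digit_loop n maxOdd) = true) := by
  induction n, maxOdd using max_odd_digit_loop.induct with
  | case1 n maxOdd h ih =>
    have hasd : ∀ x, hasDigit (PySem.Int.floordiv n 10) x = true → hasDigit n x = true := by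
      intro x hx
      rw [hasDigit, if_pos h]
      split
      · rfl
      · exact hx
    rw [max_odd_digit_loop, if_pos h]
    simp only [dite_eq_ite] at ih
    rcases ih with heq | ⟨hodd, hdig⟩
    · rw [heq]
      by_cases hc : PySem.Int.mod (PySem.Int.mod n 10) 2 = 1 ∧ PySem.Int.mod n 10 > maxOdd
      · right
        rw [if_pos hc]
        exact ⟨hc.1, by rw [hasDigit, if_pos h, if_pos rfl]⟩
      · left
        rw [if_neg hc]
    · exact Or.inr ⟨hodd, hasd _ hdig⟩
  | case2 n maxOdd h =>
    left
    rw [max_odd_digit_loop, if_neg h]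

-- any value hasDigit accepts is one of n's residues mod 10, hence in [0, 10)
theorem hasDigit_bounds (n d : Int) (hd : hasDigit n d = true) : 0 ≤ d ∧ d < 10 := by
  revert hd
  induction n using hasDigit.induct (d := d) with
  | case1 x h he =>
    intro _
    rw [← he]
    exact ⟨PySem.Int.mod_nonneg _ (by omega), PySem.Int.mod_lt _ (by omega)⟩
  | case2 x h he ih =>
    intro hd
    rw [hasDigit, if_pos h, if_neg he] at hd
    exact ih hd
  | case3 x h =>
    intro hd
    rw [hasDigit, if_neg h] at hd
    exact absurd hd (by simp)

-- ===== VERDICT (by name: the statement is the Claim_ definition above) =====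
theorem max_odd_digit_spec : Claim_equal_max_odd_digit := by
  intro n _
  unfold Spec_max_odd_digit max_odd_digit max_odd_digit_alt
  rcases loop_cases n (-1) with heq | ⟨hodd, hdig⟩
  · -- the loop returned -1: no odd digit exists, so every probe fails
    have hfalse : ∀ d, PySem.Int.mod d 2 = 1 → hasDigit n d = false := by
      intro d ho
      cases e : hasDigit n d
      · rfl
      · have hub := loop_ub d ho n (-1) e
        rw [heq] at hub
        have := (hasDigit_bounds n d e).1
        omega
    have h9 := hfalse 9 (by decide)
    have h7 := hfalse 7 (by decide)
    have h5 := hfalse 5 (by decide)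
    have h3 := hfalse 3 (by decide)
    have h1 := hfalse 1 (by decide)
    rw [heq]
    simp [List.find?, h9, h7, h5, h3, h1]
  · -- the loop returned the greatest odd digit r; the probe chain stops exactly at r
    have hub := fun d ho hdg => loop_ub d ho n (-1) hdg
    obtain ⟨hb0, hb1⟩ := hasDigit_bounds n _ hdig
    have hgt : ∀ d, PySem.Int.mod d 2 = 1 → max_odd_digit_loop n (-1) < d →
        hasDigit n d = false := by
      intro d ho hlt
      cases e : hasDigit n d
      · rfl
      · exact absurd (hub d ho e) (by omega)
    generalize hr : max_odd_digit_loop n (-1) = r at hodd hdig hb0 hb1 hgt ⊢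
    interval_cases r <;> first
      | exact absurd hodd (by decide)
      | · have h9 := hgt 9 (by decide) (by omega)
          have h7 := hgt 7 (by decide) (by omega)
          have h5 := hgt 5 (by decide) (by omega)
          have h3 := hgt 3 (by decide) (by omega)
          simp [List.find?, h9, h7, h5, h3, hdig]
      | · have h9 := hgt 9 (by decide) (by omega)
          have h7 := hgt 7 (by decide) (by omega)
          have h5 := hgt 5 (by decide) (by omega)
          simp [List.find?, h9, h7, h5, hdig]
      | · have h9 := hgt 9 (by decide) (by omega)
          have h7 := hgt 7 (by decide) (by omega)
          simp [List.find?, h9, h7, hdig]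
      | · have h9 := hgt 9 (by decide) (by omega)
          simp [List.find?, h9, hdig]
      | simp [List.find?, hdig]
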